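-- pv_equiv track=rewrite | github.com/Vipul-Bokde/Test_Automation_Hub | Selenium_Python_BDD/Libraries/general_sparc.py | get_rebate_total_from_a_dict
-- ===== SOURCE A (Python) =====
-- def get_rebate_total_from_a_dict(data, target_value):
--     rebate_total = ""
--     for key, value in data.items():
--         if isinstance(value, dict):
--             for d_key, d_value in value.items():
--                 if target_value in d_key:
--                     rebate_total = str(d_value)
--     return rebate_total
-- ===== SOURCE B (Python) =====
-- def get_rebate_total_from_a_dict(data, target_value):
--     for value in reversed(list(data.values())):
--         if isinstance(value, dict):
--             for d_key, d_value in reversed(list(value.items())):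
--                 if target_value in d_key:
--                     return str(d_value)
--     return ""
-- ===== Notes on version B (the rewrite author's own statement) =====
-- stated objective: alternative
-- what changed: B scans the outer dict's values and each inner dict's items in reverse and returns on the first match (no accumulator), instead of A's forward full scan that keeps overwriting a last-match accumulator.
import Mathlib
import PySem

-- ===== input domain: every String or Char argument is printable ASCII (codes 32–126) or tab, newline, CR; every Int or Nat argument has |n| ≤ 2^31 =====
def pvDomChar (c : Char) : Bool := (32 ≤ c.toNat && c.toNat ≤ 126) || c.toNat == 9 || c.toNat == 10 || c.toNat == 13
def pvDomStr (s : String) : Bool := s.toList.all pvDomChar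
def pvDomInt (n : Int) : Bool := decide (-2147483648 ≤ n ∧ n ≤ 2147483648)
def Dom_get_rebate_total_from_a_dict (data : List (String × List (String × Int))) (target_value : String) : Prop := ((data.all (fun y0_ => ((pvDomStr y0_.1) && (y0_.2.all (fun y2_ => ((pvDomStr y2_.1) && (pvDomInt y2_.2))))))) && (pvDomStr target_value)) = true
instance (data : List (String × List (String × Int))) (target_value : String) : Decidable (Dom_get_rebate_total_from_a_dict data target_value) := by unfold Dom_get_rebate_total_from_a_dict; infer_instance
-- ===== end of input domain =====

-- B scans both dict levels in reverse and returns on the first match (no accumulator),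
-- instead of A's forward full scan overwriting a last-match accumulator (objective: alternative).

-- ===== PORT A =====
-- Forward scan over data.items(); every value of the typed input is a dict, so the
-- 'isinstance(value, dict)' test is always true and the inner loop always runs.
def get_rebate_total_from_a_dict (data : List (String × List (String × Int))) (target_value : String) : String :=
  data.foldl (fun rebate_total kv =>
    kv.2.foldl (fun acc p =>
      if PySem.Str.isIn target_value p.1 then PySem.Int.toStr p.2 else acc) rebate_total) ""

-- ===== PORT B =====
-- the inner 'for d_key, d_value in reversed(list(value.items()))' loop: first match wins
def pvAltInner (target_value : String) : List (String × Int) → Option String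
  | [] => none
  | p :: rest =>
      if PySem.Str.isIn target_value p.1 then some (PySem.Int.toStr p.2)
      else pvAltInner target_value rest

-- the outer 'for value in reversed(list(data.values()))' loop: return on first inner hit
def pvAltOuter (target_value : String) : List (List (String × Int)) → Option String
  | [] => none
  | v :: rest =>
      match pvAltInner target_value v.reverse with
      | some s => some s
      | none => pvAltOuter target_value rest

def get_rebate_total_from_a_dict_alt (data : List (String × List (String × Int))) (target_value : String) : String :=
  (pvAltOuter target_value ((data.map Prod.snd).reverse)).getD ""

-- ===== PRECONDITION & SPEC =====
def Spec_get_rebate_total_from_a_dict (data : List (String × List (String × Int))) (target_value : String) (out : String) : Prop := out = get_rebate_total_from_a_dict_alt data target_value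
instance (data : List (String × List (String × Int))) (target_value : String) (out : String) : Decidable (Spec_get_rebate_total_from_a_dict data target_value out) := by unfold Spec_get_rebate_total_from_a_dict; infer_instance

-- ===== CLAIM (what is proved, stated in full; the proofs are below) =====
def Claim_equal_get_rebate_total_from_a_dict : Prop := ∀ (data : List (String × List (String × Int))) (target_value : String), Dom_get_rebate_total_from_a_dict data target_value → Spec_get_rebate_total_from_a_dict data target_value (get_rebate_total_from_a_dict data target_value)

-- ===== LEMMAS AND PROOFS =====

theorem pvAltInner_append (tv : String) (l1 l2 : List (String × Int)) :
    pvAltInner tv (l1 ++ l2) =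
      match pvAltInner tv l1 with
      | some s => some s
      | none => pvAltInner tv l2 := by
  induction l1 with
  | nil => simp [pvAltInner]
  | cons p rest ih =>
      simp only [List.cons_append, pvAltInner]
      split <;> simp [ih]

theorem pvAltOuter_append (tv : String) (l1 l2 : List (List (String × Int))) :
    pvAltOuter tv (l1 ++ l2) =
      match pvAltOuter tv l1 with
      | some s => some s
      | none => pvAltOuter tv l2 := by
  induction l1 with
  | nil => simp [pvAltOuter]
  | cons v rest ih =>
      simp only [List.cons_append, pvAltOuter]
      split <;> simp [ih]

-- A's inner forward fold (last match overwrites) = B's reverse-first-match with default acc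
theorem inner_foldl_eq (tv : String) (xs : List (String × Int)) (acc : String) :
    xs.foldl (fun a p => if PySem.Str.isIn tv p.1 then PySem.Int.toStr p.2 else a) acc
      = (pvAltInner tv xs.reverse).getD acc := by
  induction xs generalizing acc with
  | nil => simp [pvAltInner]
  | cons p rest ih =>
      simp only [List.foldl_cons, List.reverse_cons, pvAltInner_append]
      rw [ih]
      cases h : pvAltInner tv rest.reverse with
      | some s => simp
      | none => simp [pvAltInner]; split <;> simp

-- A's outer fold = B's reverse-first-match over the values, with default acc
theorem outer_foldl_eq (tv : String) (data : List (String × List (String × Int))) (acc : String) :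
    data.foldl (fun a kv =>
        kv.2.foldl (fun b p => if PySem.Str.isIn tv p.1 then PySem.Int.toStr p.2 else b) a) acc
      = (pvAltOuter tv ((data.map Prod.snd).reverse)).getD acc := by
  induction data generalizing acc with
  | nil => simp [pvAltOuter]
  | cons kv rest ih =>
      simp only [List.foldl_cons, List.map_cons, List.reverse_cons, pvAltOuter_append]
      rw [ih, inner_foldl_eq]
      cases h : pvAltOuter tv ((rest.map Prod.snd).reverse) with
      | some s => simp
      | none =>
          simp only [Option.getD_none, pvAltOuter]
          cases h2 : pvAltInner tv kv.2.reverse <;> simp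

-- ===== VERDICT (by name: the statement is the Claim_ definition above) =====
theorem get_rebate_total_from_a_dict_spec : Claim_equal_get_rebate_total_from_a_dict := by
  intro data target_value _
  show get_rebate_total_from_a_dict data target_value = get_rebate_total_from_a_dict_alt data target_value
  unfold get_rebate_total_from_a_dict get_rebate_total_from_a_dict_alt
  exact outer_foldl_eq target_value data ""
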